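-- pv_equiv track=rewrite | github.com/LavellM25/Fun_Python_Projects | text_validator.py | process_title
-- ===== SOURCE A (Python) =====
-- def process_title(title):
--     """
--     Process the book title by correcting capitalization and formatting.
--     :param title: The original title input by the user.
--     :return: The formatted and corrected title.
--     """
--     # Split the title into individual words
--     words = title.split()
--
--     # Words that should be lowercase unless at the start or end
--     lowercase_words = ["the", "a", "an", "of"]
--
--     corrected_title = []
--     for i, word in enumerate(words):
--         # Capitalize the first and last word regardless
--         if i == 0 or i == len(words) - 1:
--             corrected_title.append(word.capitalize())
--         # Lowercase words like "the", "a", "an", and "of" if they are not first or last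
--         elif word.lower() in lowercase_words:
--             corrected_title.append(word.lower())
--         else:
--             corrected_title.append(word.capitalize())  # Capitalize all other words
--
--     # Join the words back together to form the corrected title
--     return " ".join(corrected_title)
-- ===== SOURCE B (Python) =====
-- def process_title(title):
--     """Recursive structural decomposition: capitalize the head word, then walk
--     the tail recursively, lowercasing small interior words and capitalizing the
--     final word; no indices or enumerate needed."""
--     words = title.split()
--     if not words:
--         return ""
--
--     def fix(w):
--         lw = w.lower()
--         return lw if lw in ("the", "a", "an", "of") else w.capitalize()
--
--     def rest_parts(ws):
--         if not ws:
--             return []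
--         if len(ws) == 1:
--             return [ws[0].capitalize()]
--         return [fix(ws[0])] + rest_parts(ws[1:])
--
--     return " ".join([words[0].capitalize()] + rest_parts(words[1:]))
-- ===== Notes on version B (the rewrite author's own statement) =====
-- stated objective: alternative
-- what changed: Replaces the single enumerate loop with index comparisons (i==0 or i==len-1) by an index-free structural recursion: capitalize the head, then recurse down the tail where the singleton base case is the last word; same O(n) cost.
import Mathlib
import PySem

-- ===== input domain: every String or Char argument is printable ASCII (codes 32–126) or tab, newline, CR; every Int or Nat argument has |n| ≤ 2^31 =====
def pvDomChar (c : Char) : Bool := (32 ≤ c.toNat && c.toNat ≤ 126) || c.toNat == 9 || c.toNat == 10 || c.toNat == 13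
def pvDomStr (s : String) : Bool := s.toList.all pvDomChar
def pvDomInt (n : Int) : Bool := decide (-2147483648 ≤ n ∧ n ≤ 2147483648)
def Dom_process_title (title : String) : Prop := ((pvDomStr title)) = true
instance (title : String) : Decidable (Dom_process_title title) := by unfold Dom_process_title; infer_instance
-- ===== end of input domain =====

-- B replaces A's enumerate loop (index comparisons against 0 and len-1) by an index-free
-- structural recursion over the word list; same cost ("alternative").

-- str.capitalize(), ported by hand: upper the first char, lower the rest (exact on ASCII).
def pyCapitalize (s : String) : String :=
  match s.toList with
  | [] => ""
  | c :: cs => String.ofList (PySem.Chars.upperChar c :: PySem.Chars.lower cs)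

-- ===== PORT A =====
def process_title (title : String) : String :=
  let words := PySem.Str.split₀ title
  let lowercase_words : List String := ["the", "a", "an", "of"]
  let corrected_title := (PySem.List.enumerate words 0).foldl (fun acc p =>
    if p.1 = 0 ∨ p.1 = (words.length : Int) - 1 then acc ++ [pyCapitalize p.2]
    else if PySem.Str.lower p.2 ∈ lowercase_words then acc ++ [PySem.Str.lower p.2]
    else acc ++ [pyCapitalize p.2]) []
  PySem.Str.join " " corrected_title

-- ===== PORT B =====
def altFix (w : String) : String :=
  let lw := PySem.Str.lower w
  if lw ∈ ["the", "a", "an", "of"] then lw else pyCapitalize w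

def altRestParts : List String → List String
  | [] => []
  | [w] => [pyCapitalize w]
  | w :: x :: r => altFix w :: altRestParts (x :: r)

def process_title_alt (title : String) : String :=
  match PySem.Str.split₀ title with
  | [] => ""
  | w :: rest => PySem.Str.join " " (pyCapitalize w :: altRestParts rest)

-- ===== PRECONDITION & SPEC =====
def Spec_process_title (title : String) (out : String) : Prop := out = process_title_alt title
instance (title : String) (out : String) : Decidable (Spec_process_title title out) := by unfold Spec_process_title; infer_instance

-- ===== CLAIM (what is proved, stated in full; the proofs are below) =====
def Claim_equal_process_title : Prop := ∀ (title : String), Dom_process_title title → Spec_process_title title (process_title title)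

-- ===== LEMMAS AND PROOFS =====

-- A's per-word choice as a function of the index and word.
def aChoice (n : Nat) (p : Int × String) : String :=
  if p.1 = 0 ∨ p.1 = (n : Int) - 1 then pyCapitalize p.2
  else if PySem.Str.lower p.2 ∈ (["the", "a", "an", "of"] : List String) then PySem.Str.lower p.2
  else pyCapitalize p.2

lemma foldl_eq_map_aChoice (n : Nat) (l : List (Int × String)) (acc : List String) :
    l.foldl (fun acc p =>
      if p.1 = 0 ∨ p.1 = (n : Int) - 1 then acc ++ [pyCapitalize p.2]
      else if PySem.Str.lower p.2 ∈ (["the", "a", "an", "of"] : List String) then acc ++ [PySem.Str.lower p.2]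
      else acc ++ [pyCapitalize p.2]) acc = acc ++ l.map (aChoice n) := by
  have h : (fun (acc : List String) (p : Int × String) =>
      if p.1 = 0 ∨ p.1 = (n : Int) - 1 then acc ++ [pyCapitalize p.2]
      else if PySem.Str.lower p.2 ∈ (["the", "a", "an", "of"] : List String) then acc ++ [PySem.Str.lower p.2]
      else acc ++ [pyCapitalize p.2]) = fun acc p => acc ++ [aChoice n p] := by
    funext acc p
    unfold aChoice
    split_ifs <;> rfl
  rw [h, PySem.List.foldl_append_singleton_eq_map]

lemma map_aChoice_tail (rest : List String) :
    ∀ (k n : Nat), 1 ≤ k → k + rest.length = n →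
    (PySem.List.enumerate rest (k : Int)).map (aChoice n) = altRestParts rest := by
  induction rest with
  | nil => intro k n _ _; simp [PySem.List.enumerate_nil, altRestParts]
  | cons w r ih =>
    intro k n hk hn
    cases r with
    | nil =>
      simp only [PySem.List.enumerate_cons, PySem.List.enumerate_nil, List.map_cons,
        List.map_nil, altRestParts]
      have : aChoice n ((k : Int), w) = pyCapitalize w := by
        unfold aChoice
        have : (k : Int) = (n : Int) - 1 := by simp at hn; omega
        simp [this]
      rw [this]
    | cons x r' =>
      rw [PySem.List.enumerate_cons, List.map_cons]
      have h1 : aChoice n ((k : Int), w) = altFix w := by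
        unfold aChoice altFix
        have hne0 : ((k : Int) = 0) = False := by simp; omega
        have hnel : ((k : Int) = (n : Int) - 1) = False := by
          simp only [eq_iff_iff, iff_false]
          simp only [List.length_cons] at hn
          omega
        simp only [hne0, hnel, or_self, if_false]
      have h2 : (PySem.List.enumerate (x :: r') ((k : Int) + 1)).map (aChoice n) =
          altRestParts (x :: r') := by
        have := ih (k + 1) n (by omega) (by simp at hn ⊢; omega)
        push_cast at this
        exact this
      rw [h1, h2]
      rfl

lemma processed_lists_eq (w : String) (rest : List String) :
    (PySem.List.enumerate (w :: rest) 0).map (aChoice (w :: rest).length) =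
      pyCapitalize w :: altRestParts rest := by
  rw [PySem.List.enumerate_cons, List.map_cons]
  have h0 : aChoice (w :: rest).length (0, w) = pyCapitalize w := by
    unfold aChoice; simp
  rw [h0, show (0 : Int) + 1 = ((1 : Nat) : Int) by norm_num,
    map_aChoice_tail rest 1 (w :: rest).length (le_refl 1) (by rw [List.length_cons]; omega)]

-- ===== VERDICT (by name: the statement is the Claim_ definition above) =====
theorem process_title_spec : Claim_equal_process_title := by
  intro title _
  show process_title title = process_title_alt title
  unfold process_title process_title_alt
  cases h : PySem.Str.split₀ title with
  | nil => simp [PySem.List.enumerate_nil, List.foldl_nil, PySem.Str.join]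
  | cons w rest =>
    simp only [h]
    rw [foldl_eq_map_aChoice (w :: rest).length (PySem.List.enumerate (w :: rest) 0) [],
      List.nil_append, processed_lists_eq]
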